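-- pv_equiv track=rewrite | github.com/lixiang2017/leetcode | leetcode-cn/1447.0_Simplified_Fractions.py | simplifiedFractions
-- ===== SOURCE A (Python) =====
-- from typing import List
--
-- def simplifiedFractions(n: int) -> List[str]:
--     ans = []
--
--     def gcd(x, y):
--         if x == 0:
--             return y
--         return gcd(y % x, x)
--
--     for i in range(1, n):
--         for j in range(i + 1, n + 1):
--             # i / j
--             if gcd(i, j) == 1:
--                 ans.append(str(i) + '/' + str(j))
--
--     return ans
-- ===== SOURCE B (Python) =====
-- def simplifiedFractions(n):
--     ans = []
--     for i in range(1, n):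
--         divs = [d for d in range(2, i + 1) if i % d == 0]
--         ans += [str(i) + '/' + str(j) for j in range(i + 1, n + 1)
--                 if all(j % d for d in divs)]
--     return ans
-- ===== Notes on version B (the rewrite author's own statement) =====
-- stated objective: alternative
-- what changed: replaces the per-pair recursive Euclidean gcd test with a per-numerator precomputed list of the numerator's nontrivial divisors: j is kept iff none of them divides j, and the result is built by comprehension/extend instead of per-element append
import Mathlib
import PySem

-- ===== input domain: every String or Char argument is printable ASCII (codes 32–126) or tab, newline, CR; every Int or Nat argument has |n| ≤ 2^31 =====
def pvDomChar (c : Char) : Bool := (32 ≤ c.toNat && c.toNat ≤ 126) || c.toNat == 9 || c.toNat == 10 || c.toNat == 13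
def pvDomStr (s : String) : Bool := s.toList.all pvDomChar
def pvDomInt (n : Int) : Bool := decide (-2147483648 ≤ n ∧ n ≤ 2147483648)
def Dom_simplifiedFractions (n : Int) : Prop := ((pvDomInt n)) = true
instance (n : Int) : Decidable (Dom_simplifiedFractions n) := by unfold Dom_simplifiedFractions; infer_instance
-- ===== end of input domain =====

-- B replaces the per-pair Euclidean gcd by a per-numerator precomputed divisor list (alternative algorithm, similar cost).

-- ===== PORT A =====
-- Python's nested gcd: gcd(x, y) = y if x == 0 else gcd(y % x, x)  (Python '%' = PySem.Int.mod)
def pyGcd (x y : Int) : Int :=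
  if h : x = 0 then y else pyGcd (PySem.Int.mod y x) x
termination_by x.natAbs
decreasing_by
  rcases lt_or_gt_of_ne h with hneg | hpos
  · have h1 := PySem.Int.mod_neg_bounds y hneg
    omega
  · have h1 := PySem.Int.mod_nonneg y hpos
    have h2 := PySem.Int.mod_lt y hpos
    omega

def simplifiedFractions (n : Int) : List String :=
  (PySem.List.pyRange 1 n 1).foldl (fun ans i =>
    (PySem.List.pyRange (i + 1) (n + 1) 1).foldl (fun ans j =>
      if pyGcd i j = 1 then ans ++ [PySem.Int.toStr i ++ "/" ++ PySem.Int.toStr j] else ans)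
      ans) []

-- ===== PORT B =====
def simplifiedFractions_alt (n : Int) : List String :=
  (PySem.List.pyRange 1 n 1).foldl (fun ans i =>
    let divs := (PySem.List.pyRange 2 (i + 1) 1).filter (fun d => PySem.Int.mod i d == 0)
    ans ++ ((PySem.List.pyRange (i + 1) (n + 1) 1).filter
        (fun j => divs.all (fun d => PySem.Int.mod j d != 0))).map
      (fun j => PySem.Int.toStr i ++ "/" ++ PySem.Int.toStr j)) []

-- ===== PRECONDITION & SPEC =====
def Spec_simplifiedFractions (n : Int) (out : List String) : Prop := out = simplifiedFractions_alt n
instance (n : Int) (out : List String) : Decidable (Spec_simplifiedFractions n out) := by unfold Spec_simplifiedFractions; infer_instance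

-- ===== CLAIM (what is proved, stated in full; the proofs are below) =====
def Claim_equal_simplifiedFractions : Prop := ∀ (n : Int), Dom_simplifiedFractions n → Spec_simplifiedFractions n (simplifiedFractions n)

-- ===== LEMMAS AND PROOFS =====

theorem pyGcd_natCast (a b : Nat) : pyGcd (a : Int) (b : Int) = (Nat.gcd a b : Int) := by
  induction a using Nat.strong_induction_on generalizing b with
  | _ a ih =>
    rw [pyGcd]
    by_cases ha : a = 0
    · subst ha; simp
    · have ha' : ((a : Int)) ≠ 0 := by exact_mod_cast ha
      simp only [ha', dif_neg, not_false_iff]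
      rw [PySem.Int.mod_natCast]
      rw [ih (b % a) (Nat.mod_lt _ (Nat.pos_of_ne_zero ha))]
      rw [← Nat.gcd_rec]

theorem gcd_one_iff_no_common (a b : Nat) (ha : 1 ≤ a) :
    Nat.gcd a b = 1 ↔ ∀ d : Nat, 2 ≤ d → d ∣ a → ¬ d ∣ b := by
  constructor
  · intro h d hd hda hdb
    have : d ∣ Nat.gcd a b := Nat.dvd_gcd hda hdb
    rw [h] at this
    have := Nat.le_of_dvd one_pos this
    omega
  · intro h
    by_contra hg
    have hga := Nat.gcd_dvd_left a b
    have hgb := Nat.gcd_dvd_right a b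
    have hne : Nat.gcd a b ≠ 0 := by
      intro h0
      have := (Nat.gcd_eq_zero_iff.mp h0).1
      omega
    exact h (Nat.gcd a b) (by omega) hga hgb

theorem pyGcd_one_iff (i j : Int) (hi : 1 ≤ i) (hj : 0 ≤ j) :
    pyGcd i j = 1 ↔ ∀ d : Int, 2 ≤ d → d ∣ i → ¬ d ∣ j := by
  have hi0 : 0 ≤ i := by omega
  have hiN : i = (i.toNat : Int) := (Int.toNat_of_nonneg hi0).symm
  have hjN : j = (j.toNat : Int) := (Int.toNat_of_nonneg hj).symm
  rw [hiN, hjN, pyGcd_natCast]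
  have haN : 1 ≤ i.toNat := by omega
  constructor
  · intro h d hd hdi hdj
    have hgcd := (gcd_one_iff_no_common i.toNat j.toNat haN).mp (by exact_mod_cast h)
    have hd0 : 0 ≤ d := by omega
    have hdN : d = (d.toNat : Int) := (Int.toNat_of_nonneg hd0).symm
    rw [hdN] at hdi hdj
    exact hgcd d.toNat (by omega) (Int.natCast_dvd_natCast.mp hdi) (Int.natCast_dvd_natCast.mp hdj)
  · intro h
    have : ∀ d : Nat, 2 ≤ d → d ∣ i.toNat → ¬ d ∣ j.toNat := by
      intro d hd hdi hdj
      exact h (d : Int) (by exact_mod_cast hd) (Int.natCast_dvd_natCast.mpr hdi)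
        (Int.natCast_dvd_natCast.mpr hdj)
    exact_mod_cast (gcd_one_iff_no_common i.toNat j.toNat haN).mpr this

-- the per-pair condition of A equals B's divisor-list test, for 1 ≤ i < j
theorem cond_eq (i j : Int) (hi : 1 ≤ i) (hj : i < j) :
    decide (pyGcd i j = 1) =
      ((PySem.List.pyRange 2 (i + 1) 1).filter (fun d => PySem.Int.mod i d == 0)).all
        (fun d => PySem.Int.mod j d != 0) := by
  have hiff : (pyGcd i j = 1) ↔
      (((PySem.List.pyRange 2 (i + 1) 1).filter (fun d => PySem.Int.mod i d == 0)).all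
        (fun d => PySem.Int.mod j d != 0) = true) := by
    rw [pyGcd_one_iff i j hi (by omega)]
    simp only [List.all_eq_true, List.mem_filter, PySem.List.mem_pyRange_one,
      beq_iff_eq, bne_iff_ne, ne_eq, PySem.Int.mod_eq_zero_iff_dvd, and_imp]
    constructor
    · intro h d hd2 _ hdi
      exact h d hd2 hdi
    · intro h d hd2 hdi
      have hdle : d ≤ i := Int.le_of_dvd (by omega) hdi
      exact h d hd2 (by omega) hdi
  rcases Bool.eq_false_or_eq_true (((PySem.List.pyRange 2 (i + 1) 1).filter
      (fun d => PySem.Int.mod i d == 0)).all (fun d => PySem.Int.mod j d != 0)) with hb | hb <;>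
    rw [hb] <;> simp [hiff, hb]

-- ===== VERDICT (by name: the statement is the Claim_ definition above) =====
theorem simplifiedFractions_spec : Claim_equal_simplifiedFractions := by
  intro n _
  unfold Spec_simplifiedFractions simplifiedFractions simplifiedFractions_alt
  apply PySem.List.foldl_congr_mem
  intro acc i hmem
  have hi : 1 ≤ i ∧ i < n := PySem.List.mem_pyRange_one.mp hmem
  rw [PySem.List.foldl_append_ite (p := fun j => pyGcd i j = 1)
    (f := fun j => PySem.Int.toStr i ++ "/" ++ PySem.Int.toStr j)]
  congr 1
  congr 1
  apply List.filter_congr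
  intro j hj
  have hj' : i + 1 ≤ j ∧ j < n + 1 := PySem.List.mem_pyRange_one.mp hj
  exact cond_eq i j hi.1 (by omega)
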